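-- pv_equiv track=rewrite | github.com/callumgoodley/python | Code/sum67.py | fetch_numbers
-- ===== SOURCE A (Python) =====
-- def find_index(six_index, indices_list):
--     index = []
--     for i in indices_list:
--         if i > six_index:
--             index.append(i)
--     return index[0]
--
-- def fetch_numbers(nums):
--
--     nums_list = []
--     six_indices = [i for i, x in enumerate(nums) if x == 6]
--     seven_indices = [i for i, x in enumerate(nums) if x == 7]
--
--     if 6 in nums:
--
--         for i in range(0, nums.index(6)):
--             nums_list.append(nums[i])
--         for j in range(find_index(nums.index(6), seven_indices) + 1, len(nums)):
--             nums_list.append(nums[j])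
--     else:
--         for n in nums:
--             nums_list.append(n)
--     return nums_list
-- ===== SOURCE B (Python) =====
-- def fetch_numbers(nums):
--     res = []
--     found_six = False
--     found_seven = False
--     for x in nums:
--         if found_seven:
--             res.append(x)
--         elif found_six:
--             if x == 7:
--                 found_seven = True
--         elif x == 6:
--             found_six = True
--         else:
--             res.append(x)
--     return res
-- ===== Notes on version B (the rewrite author's own statement) =====
-- stated objective: simpler
-- what changed: Replaced A's index-list construction (enumerate comprehensions, list.index, a helper filtering seven-indices, and two index-driven copy loops) by one linear state-machine pass with two booleans that copies, skips between the first 6 and the following 7, and copies again.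
import Mathlib
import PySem

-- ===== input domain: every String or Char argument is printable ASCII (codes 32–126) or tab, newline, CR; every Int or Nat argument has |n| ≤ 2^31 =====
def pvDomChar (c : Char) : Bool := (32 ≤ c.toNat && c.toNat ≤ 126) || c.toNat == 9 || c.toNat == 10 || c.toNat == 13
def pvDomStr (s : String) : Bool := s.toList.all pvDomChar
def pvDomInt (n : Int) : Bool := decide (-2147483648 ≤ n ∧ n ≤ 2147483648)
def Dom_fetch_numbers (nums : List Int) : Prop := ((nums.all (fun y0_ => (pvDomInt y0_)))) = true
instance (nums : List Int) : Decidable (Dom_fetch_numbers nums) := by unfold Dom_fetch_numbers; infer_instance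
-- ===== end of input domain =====

-- B replaces A's index bookkeeping (enumerate comprehensions, list.index, a filtering
-- helper, two index-driven copy loops) by one direct state-machine pass; objective: simpler.

-- ===== PORT A =====
-- index[0] on the empty filtered list is Python's IndexError: modelled as pyGet? = none.
def find_index (six_index : Int) (indices_list : List Int) : Option Int :=
  let index := indices_list.foldl (fun acc i => if six_index < i then acc ++ [i] else acc) []
  PySem.List.pyGet? index 0

def fetch_numbers (nums : List Int) : List Int :=
  let _six_indices := (PySem.List.enumerate nums 0).foldl
    (fun acc p => if p.2 = 6 then acc ++ [p.1] else acc) []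
  let seven_indices := (PySem.List.enumerate nums 0).foldl
    (fun acc p => if p.2 = 7 then acc ++ [p.1] else acc) []
  if 6 ∈ nums then
    match PySem.List.index? nums 6 with
    | none => []      -- unreachable: 6 ∈ nums
    | some i6 =>
      let first := (PySem.List.pyRange 0 (i6 : Int) 1).foldl
        (fun acc i => acc ++ (PySem.List.pyGet? nums i).toList) []
      match find_index (i6 : Int) seven_indices with
      | none => []    -- Python raises IndexError here; excluded by Pre_
      | some i7 =>
        (PySem.List.pyRange (i7 + 1) (nums.length : Int) 1).foldl
          (fun acc j => acc ++ (PySem.List.pyGet? nums j).toList) first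
  else
    nums.foldl (fun acc n => acc ++ [n]) []

-- ===== PORT B =====
def fetchStep (st : List Int × Bool × Bool) (x : Int) : List Int × Bool × Bool :=
  match st with
  | (res, fs, fv) =>
    if fv then (res ++ [x], fs, fv)
    else if fs then (if x = 7 then (res, fs, true) else (res, fs, fv))
    else if x = 6 then (res, true, fv)
    else (res ++ [x], fs, fv)

def fetch_numbers_alt (nums : List Int) : List Int :=
  (nums.foldl fetchStep ([], false, false)).1

-- ===== PRECONDITION & SPEC =====
-- Pre_ excludes exactly the inputs where A raises IndexError: a 6 present with no 7 after the first 6.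
def Pre_fetch_numbers (nums : List Int) : Prop :=
  6 ∈ nums → 7 ∈ nums.drop (nums.idxOf 6 + 1)
instance (nums : List Int) : Decidable (Pre_fetch_numbers nums) := by
  unfold Pre_fetch_numbers; infer_instance
def pvWitness_fetch_numbers : List Int := [1, 6, 2, 7, 3]

def Spec_fetch_numbers (nums : List Int) (out : List Int) : Prop := out = fetch_numbers_alt nums
instance (nums : List Int) (out : List Int) : Decidable (Spec_fetch_numbers nums out) := by unfold Spec_fetch_numbers; infer_instance

-- ===== CLAIM (what is proved, stated in full; the proofs are below) =====
def Claim_equal_fetch_numbers : Prop := ∀ (nums : List Int), Dom_fetch_numbers nums → Pre_fetch_numbers nums → Spec_fetch_numbers nums (fetch_numbers nums)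

-- ===== LEMMAS AND PROOFS =====

-- B side: the state machine on each of the three phases
theorem fetchB_pre (l : List Int) (acc : List Int) (h : 6 ∉ l) :
    l.foldl fetchStep (acc, false, false) = (acc ++ l, false, false) := by
  induction l generalizing acc with
  | nil => simp
  | cons x xs ih =>
    simp only [List.mem_cons, not_or] at h
    simp only [List.foldl_cons, fetchStep]
    simp only [Bool.false_eq_true, if_false]
    rw [if_neg (fun he => h.1 he.symm), ih _ h.2]
    simp

theorem fetchB_mid (l : List Int) (acc : List Int) (h : 7 ∉ l) :
    l.foldl fetchStep (acc, true, false) = (acc, true, false) := by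
  induction l generalizing acc with
  | nil => simp
  | cons x xs ih =>
    simp only [List.mem_cons, not_or] at h
    simp only [List.foldl_cons, fetchStep]
    simp only [Bool.false_eq_true, if_false, if_true]
    rw [if_neg (fun he => h.1 he.symm), ih _ h.2]

theorem fetchB_post (l : List Int) (acc : List Int) :
    l.foldl fetchStep (acc, true, true) = (acc ++ l, true, true) := by
  induction l generalizing acc with
  | nil => simp
  | cons x xs ih =>
    simp only [List.foldl_cons, fetchStep, if_true]
    rw [ih]
    simp

theorem fetchB_char (p r s : List Int) (hp : 6 ∉ p) (hr : 7 ∉ r) :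
    fetch_numbers_alt (p ++ 6 :: (r ++ 7 :: s)) = p ++ s := by
  unfold fetch_numbers_alt
  rw [List.foldl_append, fetchB_pre p [] hp]
  simp only [List.nil_append, List.foldl_cons]
  have h6 : fetchStep (p, false, false) 6 = (p, true, false) := by
    simp [fetchStep]
  rw [h6, List.foldl_append, fetchB_mid r p hr]
  simp only [List.foldl_cons]
  have h7 : fetchStep (p, true, false) 7 = (p, true, true) := by
    simp [fetchStep]
  rw [h7, fetchB_post]

-- A side helpers
def idx7 : List Int → Int → List Int
  | [], _ => []
  | x :: xs, s => (if x = 7 then [s] else []) ++ idx7 xs (s + 1)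

theorem seven_foldl (l : List Int) : ∀ (s : Int) (acc : List Int),
    (PySem.List.enumerate l s).foldl (fun acc p => if p.2 = 7 then acc ++ [p.1] else acc) acc
      = acc ++ idx7 l s := by
  induction l with
  | nil => intro s acc; simp [PySem.List.enumerate_nil, idx7]
  | cons x xs ih =>
    intro s acc
    rw [PySem.List.enumerate_cons]
    simp only [List.foldl_cons]
    by_cases hx : x = 7
    · rw [if_pos hx, ih]
      simp [idx7, hx]
    · rw [if_neg hx, ih]
      simp [idx7, hx]

theorem idx7_append (l₁ l₂ : List Int) (s : Int) :
    idx7 (l₁ ++ l₂) s = idx7 l₁ s ++ idx7 l₂ (s + l₁.length) := by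
  induction l₁ generalizing s with
  | nil => simp [idx7]
  | cons x xs ih =>
    simp only [List.cons_append, idx7, ih, List.length_cons]
    rw [List.append_assoc]
    congr 2
    push_cast
    ring_nf

theorem idx7_bound (l : List Int) : ∀ (s : Int), ∀ i ∈ idx7 l s, s ≤ i ∧ i < s + l.length := by
  induction l with
  | nil => intro s i hi; simp [idx7] at hi
  | cons x xs ih =>
    intro s i hi
    simp only [idx7, List.mem_append] at hi
    rcases hi with hi | hi
    · split_ifs at hi with hx
      · simp at hi; subst hi
        simp only [List.length_cons]
        push_cast
        omega
      · simp at hi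
    · have := ih (s + 1) i hi
      simp only [List.length_cons]
      push_cast
      omega

theorem idx7_none (l : List Int) (s : Int) (h : 7 ∉ l) : idx7 l s = [] := by
  induction l generalizing s with
  | nil => rfl
  | cons x xs ih =>
    simp only [List.mem_cons, not_or] at h
    have hx : ¬ x = 7 := fun he => h.1 he.symm
    simp [idx7, hx, ih _ h.2]

theorem idxOf_first (p q : List Int) (hp : 6 ∉ p) : (p ++ 6 :: q).idxOf 6 = p.length := by
  induction p with
  | nil => simp
  | cons x xs ih =>
    simp only [List.mem_cons, not_or] at hp
    have hx : (x == (6:Int)) = false := by simpa using fun he => hp.1 he.symm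
    simp [List.idxOf_cons, hx, ih hp.2]

theorem drop_mid (p q : List Int) : (p ++ (6:Int) :: q).drop (p.length + 1) = q := by
  rw [show p ++ (6:Int) :: q = (p ++ [6]) ++ q by simp,
      show p.length + 1 = (p ++ [(6:Int)]).length by simp,
      List.drop_left]

theorem filt_foldl (six : Int) (l : List Int) : ∀ (acc : List Int),
    l.foldl (fun acc i => if six < i then acc ++ [i] else acc) acc
      = acc ++ l.filter (fun i => six < i) := by
  induction l with
  | nil => intro acc; simp
  | cons x xs ih =>
    intro acc
    simp only [List.foldl_cons, List.filter_cons]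
    by_cases hx : six < x
    · rw [if_pos hx, ih]; simp [hx]
    · rw [if_neg hx, ih]; simp [hx]

theorem copy_loop (nums : List Int) : ∀ (n a : Nat) (acc : List Int),
    (PySem.List.pyRange (a : Int) ((a : Int) + (n : Int)) 1).foldl
        (fun acc i => acc ++ (PySem.List.pyGet? nums i).toList) acc
      = acc ++ (nums.drop a).take n := by
  intro n
  induction n with
  | zero =>
    intro a acc
    rw [PySem.List.pyRange_one_eq_nil (by omega)]
    simp
  | succ n ih =>
    intro a acc
    rw [PySem.List.pyRange_one_cons (by push_cast; omega)]
    simp only [List.foldl_cons]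
    have hc : ((a : Int) + 1) = ((a + 1 : Nat) : Int) := by push_cast; ring
    have hb : ((a : Int) + ((n + 1 : Nat)) : Int) = ((a + 1 : Nat) : Int) + (n : Int) := by
      push_cast; ring
    rw [hb, hc, ih (a + 1)]
    rw [PySem.List.pyGet?_natCast]
    by_cases ha : a < nums.length
    · rw [List.getElem?_eq_getElem ha, List.drop_eq_getElem_cons ha]
      simp only [List.take_succ_cons, Option.toList_some]
      simp
    · rw [List.getElem?_eq_none (by omega)]
      rw [List.drop_eq_nil_of_le (by omega), List.drop_eq_nil_of_le (by omega)]
      simp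

theorem append_loop (l : List Int) : ∀ (acc : List Int),
    l.foldl (fun acc n => acc ++ [n]) acc = acc ++ l := by
  induction l with
  | nil => intro acc; simp
  | cons x xs ih => intro acc; simp [List.foldl_cons, ih]

theorem fetchA_char (p r s : List Int) (hp : 6 ∉ p) (hr : 7 ∉ r) :
    fetch_numbers (p ++ 6 :: (r ++ 7 :: s)) = p ++ s := by
  unfold fetch_numbers
  have hmem : (6 : Int) ∈ p ++ 6 :: (r ++ 7 :: s) := by simp
  rw [if_pos hmem]
  have hidx : PySem.List.index? (p ++ 6 :: (r ++ 7 :: s)) 6 = some p.length := by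
    rw [PySem.List.index?_eq_some_iff]
    exact ⟨p, r ++ 7 :: s, rfl, rfl, hp⟩
  rw [hidx, seven_foldl]
  simp only [List.nil_append]
  have hm : ∀ t : List Int, idx7 ((6:Int) :: t) (↑p.length : Int) = idx7 t (↑p.length + 1) := by
    intro t; simp [idx7]
  have hidx7 : idx7 (p ++ 6 :: (r ++ 7 :: s)) 0
      = idx7 p 0 ++ ((↑p.length + 1 + ↑r.length : Int) :: idx7 s (↑p.length + 1 + ↑r.length + 1)) := by
    rw [idx7_append]
    norm_num [hm]
    rw [idx7_append, idx7_none r _ hr]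
    simp only [List.nil_append, idx7]
    norm_num
  rw [hidx7]
  have hfilt : List.filter (fun i => decide ((↑p.length : Int) < i)) (idx7 p 0) = [] :=
    List.filter_eq_nil_iff.2 (fun i hi => by
      have := idx7_bound p 0 i hi
      simp only [decide_eq_true_eq, not_lt]
      omega)
  have hfind : find_index (↑p.length)
      (idx7 p 0 ++ ((↑p.length + 1 + ↑r.length : Int) :: idx7 s (↑p.length + 1 + ↑r.length + 1)))
      = some (↑p.length + 1 + ↑r.length : Int) := by
    unfold find_index
    rw [filt_foldl]
    simp only [List.nil_append, List.filter_append, hfilt, List.filter_cons]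
    rw [if_pos (show decide ((↑p.length : Int) < ↑p.length + 1 + ↑r.length) = true by
      simp only [decide_eq_true_eq]; omega)]
    exact PySem.List.pyGet?_zero_cons _ _
  rw [hfind]
  have hrange1 : PySem.List.pyRange 0 (↑p.length) 1
      = PySem.List.pyRange ((0:Nat):Int) (((0:Nat):Int) + (p.length:Int)) 1 := by norm_num
  rw [hrange1, copy_loop]
  simp only [List.drop_zero, List.nil_append, List.take_left]
  have hlen : ((p ++ 6 :: (r ++ 7 :: s)).length : Int)
      = ((p.length + r.length + 2 : Nat) : Int) + (s.length : Int) := by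
    simp [List.length_append]; ring
  have hrange2 : PySem.List.pyRange ((↑p.length + 1 + ↑r.length : Int) + 1) ((p ++ 6 :: (r ++ 7 :: s)).length : Int) 1
      = PySem.List.pyRange (((p.length + r.length + 2 : Nat)) : Int) (((p.length + r.length + 2 : Nat) : Int) + (s.length : Int)) 1 := by
    rw [hlen]; congr 1; push_cast; ring
  rw [hrange2, copy_loop]
  have hdrop2 : (p ++ 6 :: (r ++ 7 :: s)).drop (p.length + r.length + 2) = s := by
    rw [show p ++ 6 :: (r ++ 7 :: s) = (p ++ 6 :: (r ++ [7])) ++ s by simp,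
        show p.length + r.length + 2 = (p ++ 6 :: (r ++ [7])).length by simp; omega,
        List.drop_left]
  rw [hdrop2]
  simp


-- ===== VERDICT (by name: the statement is the Claim_ definition above) =====
theorem fetch_numbers_spec : Claim_equal_fetch_numbers := by
  intro nums _ hpre
  unfold Spec_fetch_numbers
  by_cases h6 : (6 : Int) ∈ nums
  · obtain ⟨k, hk⟩ := (PySem.List.index?_isSome_iff nums 6).2 h6 |> Option.isSome_iff_exists.1
    obtain ⟨p, q, hnums, hlen, hp⟩ := (PySem.List.index?_eq_some_iff _ _ _).1 hk
    have hdrop : nums.drop (nums.idxOf 6 + 1) = q := by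
      rw [hnums, idxOf_first p q hp, drop_mid]
    have h7 : (7 : Int) ∈ q := by rw [← hdrop]; exact hpre h6
    obtain ⟨k2, hk2⟩ := (PySem.List.index?_isSome_iff q 7).2 h7 |> Option.isSome_iff_exists.1
    obtain ⟨r, s, hq, _, hr⟩ := (PySem.List.index?_eq_some_iff _ _ _).1 hk2
    subst hq
    rw [hnums, fetchA_char p r s hp hr, fetchB_char p r s hp hr]
  · -- no 6: both copy the whole list
    unfold fetch_numbers fetch_numbers_alt
    rw [if_neg h6, append_loop, fetchB_pre nums [] h6]
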